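-- pv_equiv track=rewrite | github.com/BeaconCMS/tailwind_compiler | benchmark/deep_validate.py | escape_candidate
-- ===== SOURCE A (Python) =====
-- def escape_candidate(candidate):
--     """Escape a candidate class name for CSS selector matching."""
--     result = []
--     for i, c in enumerate(candidate):
--         special = set(':/.[]#!@%()=,\'">')
--         if c in special:
--             result.append('\\')
--             result.append(c)
--         elif i == 0 and c.isdigit():
--             result.append(f'\\{ord(c):x} ')
--         elif i == 1 and c.isdigit() and candidate[0] == '-':
--             result.append(f'\\{ord(c):x} ')
--         else:
--             result.append(c)
--     return ''.join(result)
-- ===== SOURCE B (Python) =====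
-- _SPECIALS = ':/.[]#!@%()=,\'">'
-- _TABLE = str.maketrans({ch: '\\' + ch for ch in _SPECIALS})
--
--
-- def escape_candidate(candidate):
--     """Escape a candidate class name for CSS selector matching."""
--     if candidate[:1].isdigit():
--         idx = 0
--     elif candidate[:1] == '-' and candidate[1:2].isdigit():
--         idx = 1
--     else:
--         return candidate.translate(_TABLE)
--     c = candidate[idx]
--     return (candidate[:idx].translate(_TABLE)
--             + f'\\{ord(c):x} '
--             + candidate[idx + 1:].translate(_TABLE))
-- ===== Notes on version B (the rewrite author's own statement) =====
-- stated objective: faster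
-- what changed: Replaces the per-character branch loop (which rebuilds the special-char set on every iteration and re-tests the index against 0 and 1 inside the loop) by a prebuilt str.maketrans translation table applied with candidate.translate in one pass, with the single leading-digit escape position computed once up front and the result assembled from three slices.
import Mathlib
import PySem

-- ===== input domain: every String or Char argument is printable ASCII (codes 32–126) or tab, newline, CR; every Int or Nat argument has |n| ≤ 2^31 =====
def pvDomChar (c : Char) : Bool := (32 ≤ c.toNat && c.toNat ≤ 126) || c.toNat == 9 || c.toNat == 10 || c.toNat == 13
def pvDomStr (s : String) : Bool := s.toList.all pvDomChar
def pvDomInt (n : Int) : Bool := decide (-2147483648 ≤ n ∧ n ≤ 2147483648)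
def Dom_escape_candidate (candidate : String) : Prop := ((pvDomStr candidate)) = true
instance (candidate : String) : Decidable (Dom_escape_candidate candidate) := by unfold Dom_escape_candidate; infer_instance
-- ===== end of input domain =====

-- B replaces the per-character branch loop by a prebuilt translation table applied in one
-- pass, with the single leading-digit escape position computed once up front (idiomatic).

-- f'\{ord(c):x} ' (both Pythons format the escaped digit the same way)
def pvHex (c : Char) : List Char := '\\' :: (Nat.toDigits 16 c.toNat) ++ [' ']

-- ===== PORT A =====
-- the loop body's step: special-set test, then the two position-dependent digit branches
def pvStepA (cs : List Char) (acc : List (List Char)) (ic : Int × Char) : List (List Char) :=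
  let i := ic.1
  let c := ic.2
  let special : PySem.Set Char := PySem.Set.ofList (":/.[]#!@%()=,'\">".toList)
  if PySem.Set.contains special c then acc ++ [['\\'], [c]]
  else if i == 0 && PySem.Chars.isdigit c then acc ++ [pvHex c]
  else if i == 1 && PySem.Chars.isdigit c && (PySem.List.pyGet? cs 0 == some '-') then acc ++ [pvHex c]
  else acc ++ [[c]]

def escape_candidate (candidate : String) : String :=
  let cs := candidate.toList
  let result := (PySem.List.enumerate cs).foldl (pvStepA cs) []
  String.ofList result.flatten

-- ===== PORT B =====
-- candidate.translate(_TABLE): each special char becomes '\' + itself, others pass through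
def pvTranslate (cs : List Char) : List Char :=
  cs.flatMap (fun c => if (":/.[]#!@%()=,'\">".toList).contains c then ['\\', c] else [c])

def escape_candidate_alt (candidate : String) : String :=
  let cs := candidate.toList
  let idx? : Option Nat :=
    match cs with
    | [] => none
    | c0 :: rest =>
      if PySem.Chars.isdigit c0 then some 0
      else match rest with
           | d :: _ => if c0 == '-' && PySem.Chars.isdigit d then some 1 else none
           | [] => none
  match idx? with
  | none => String.ofList (pvTranslate cs)
  | some idx =>
    String.ofList (pvTranslate (cs.take idx) ++ pvHex (cs.getD idx ' ') ++ pvTranslate (cs.drop (idx + 1)))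

-- ===== PRECONDITION & SPEC =====
def Spec_escape_candidate (candidate : String) (out : String) : Prop := out = escape_candidate_alt candidate
instance (candidate : String) (out : String) : Decidable (Spec_escape_candidate candidate out) := by unfold Spec_escape_candidate; infer_instance

-- ===== CLAIM (what is proved, stated in full; the proofs are below) =====
def Claim_equal_escape_candidate : Prop := ∀ (candidate : String), Dom_escape_candidate candidate → Spec_escape_candidate candidate (escape_candidate candidate)

-- ===== LEMMAS AND PROOFS =====

-- the special characters, and what A's loop emits for a char past the first two positions
def pvSp : List Char := ":/.[]#!@%()=,'\">".toList
def pvEmit (c : Char) : List (List Char) := if pvSp.contains c then [['\\'], [c]] else [[c]]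

theorem pvContains_eq (c : Char) :
    PySem.Set.contains (PySem.Set.ofList (":/.[]#!@%()=,'\">".toList)) c = pvSp.contains c := by
  have h : PySem.Set.ofList (":/.[]#!@%()=,'\">".toList) = pvSp := by decide
  rw [h]; rfl

theorem pvDigit_not_special (c : Char) (h : PySem.Chars.isdigit c = true) :
    pvSp.contains c = false := by
  have hl : pvSp = [':','/','.','[',']','#','!','@','%','(',')','=',',','\'','\"','>'] := by decide
  rw [hl]
  simp only [List.contains_eq_mem, decide_eq_false_iff_not]
  intro hc
  fin_cases hc <;> revert h <;> decide

theorem pvStepA_other (cs : List Char) (acc : List (List Char)) (i : Int) (c : Char)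
    (h1 : ¬ (i = 0 ∧ PySem.Chars.isdigit c = true))
    (h2 : ¬ (i = 1 ∧ PySem.Chars.isdigit c = true ∧ PySem.List.pyGet? cs 0 = some '-')) :
    pvStepA cs acc (i, c) = acc ++ pvEmit c := by
  simp only [pvStepA, pvEmit, pvContains_eq]
  cases hsp : pvSp.contains c with
  | true => simp only [if_true]
  | false =>
    have hA : (i == 0 && PySem.Chars.isdigit c) = false := by
      by_contra hx
      simp only [Bool.not_eq_false, Bool.and_eq_true, beq_iff_eq] at hx
      exact h1 ⟨hx.1, hx.2⟩
    have hB : (i == 1 && PySem.Chars.isdigit c && (PySem.List.pyGet? cs 0 == some '-')) = false := by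
      by_contra hx
      simp only [Bool.not_eq_false, Bool.and_eq_true, beq_iff_eq] at hx
      exact h2 ⟨hx.1.1, hx.1.2, hx.2⟩
    rw [hA, hB]
    simp only [Bool.false_eq_true, if_false]

theorem pvFold_tail (cs : List Char) (l : List Char) (acc : List (List Char)) (s : Int)
    (hs : 1 ≤ s) (h : 2 ≤ s ∨ PySem.List.pyGet? cs 0 ≠ some '-') :
    (PySem.List.enumerate l s).foldl (pvStepA cs) acc = acc ++ l.flatMap pvEmit := by
  induction l generalizing acc s with
  | nil => simp [PySem.List.enumerate_nil]
  | cons x xs ih =>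
    rw [PySem.List.enumerate_cons, List.foldl_cons]
    rw [pvStepA_other cs acc s x (by omega) ?h2]
    · rw [ih (acc ++ pvEmit x) (s + 1) (by omega) (Or.inl (by omega))]
      simp [List.flatMap_cons, List.append_assoc]
    case h2 =>
      rintro ⟨h1, _, h3⟩
      rcases h with h | h
      · omega
      · exact h h3

theorem pvFlatten_emit (l : List Char) : (l.flatMap pvEmit).flatten = pvTranslate l := by
  induction l with
  | nil => simp [pvTranslate]
  | cons x xs ih =>
    have hT : pvTranslate (x :: xs)
        = (if pvSp.contains x then ['\\', x] else [x]) ++ pvTranslate xs := by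
      simp only [pvTranslate, List.flatMap_cons]
      rfl
    rw [List.flatMap_cons, List.flatten_append, ih, hT, pvEmit]
    cases hx : pvSp.contains x with
    | true => simp only [if_true, List.flatten]; rfl
    | false => simp only [Bool.false_eq_true, if_false, List.flatten]; rfl

-- ===== VERDICT (by name: the statement is the Claim_ definition above) =====
theorem escape_candidate_spec : Claim_equal_escape_candidate := by
  intro candidate _
  unfold Spec_escape_candidate escape_candidate escape_candidate_alt
  generalize candidate.toList = cs
  dsimp only
  rcases cs with _ | ⟨c0, rest⟩
  · simp [PySem.List.enumerate_nil, pvTranslate]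
  · dsimp only
    by_cases hd0 : PySem.Chars.isdigit c0 = true
    · -- leading digit: escaped as hex at index 0
      have hne : c0 ≠ '-' := by intro h; subst h; revert hd0; decide
      rw [PySem.List.enumerate_cons, List.foldl_cons]
      have hstep : pvStepA (c0 :: rest) [] (0, c0) = [pvHex c0] := by
        simp only [pvStepA, pvContains_eq]
        rw [pvDigit_not_special c0 hd0, hd0]
        simp
      rw [hstep, pvFold_tail (c0 :: rest) rest [pvHex c0] (0 + 1) (by omega)
          (Or.inr (by simp [PySem.List.pyGet?, PySem.List.pyIdx?, hne]))]
      rw [hd0]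
      simp [pvFlatten_emit, pvTranslate]
    · rw [PySem.List.enumerate_cons, List.foldl_cons]
      have hstep0 : pvStepA (c0 :: rest) [] (0, c0) = pvEmit c0 := by
        rw [pvStepA_other _ _ _ _ (by rintro ⟨_, h⟩; exact hd0 h) (by rintro ⟨h, _⟩; omega)]
        simp
      rw [hstep0]
      simp only [Bool.not_eq_true] at hd0
      rw [hd0]
      rcases rest with _ | ⟨d, rest2⟩
      · simp only [PySem.List.enumerate_nil, List.foldl_nil, Bool.false_eq_true, if_false]
        rw [← pvFlatten_emit]
        simp [List.flatMap_cons]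
      · by_cases hdd : (c0 == '-' && PySem.Chars.isdigit d) = true
        · -- '-' followed by a digit: escaped as hex at index 1
          have hdd' := hdd
          simp only [Bool.and_eq_true, beq_iff_eq] at hdd'
          obtain ⟨hc0, hdig⟩ := hdd'
          subst hc0
          rw [PySem.List.enumerate_cons, List.foldl_cons]
          have hget0 : PySem.List.pyGet? ('-' :: d :: rest2) 0 = some '-' := by
            have hle : (0:Int) ≤ (rest2.length : Int) + 1 := by positivity
            simp [PySem.List.pyGet?, PySem.List.pyIdx?, hle]
          have hstep1 : pvStepA ('-' :: d :: rest2) (pvEmit '-') (0 + 1, d)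
              = pvEmit '-' ++ [pvHex d] := by
            simp only [pvStepA, pvContains_eq]
            rw [pvDigit_not_special d hdig, hdig, hget0]
            simp
          rw [hstep1,
            pvFold_tail ('-' :: d :: rest2) rest2 (pvEmit '-' ++ [pvHex d]) (0 + 1 + 1)
              (by omega) (Or.inl (by omega))]
          simp only [Bool.false_eq_true, if_false]
          rw [hdd]
          have hm : pvEmit '-' = [['-']] := by decide
          have hm2 : pvTranslate ['-'] = ['-'] := by decide
          simp [hm, hm2, pvFlatten_emit]
        · -- no leading-digit escape anywhere
          rw [PySem.List.enumerate_cons, List.foldl_cons]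
          have hget0 : PySem.List.pyGet? (c0 :: d :: rest2) 0 = some c0 := by
            have hle : (0:Int) ≤ (rest2.length : Int) + 1 := by positivity
            simp [PySem.List.pyGet?, PySem.List.pyIdx?, hle]
          have hstep1 : pvStepA (c0 :: d :: rest2) (pvEmit c0) (0 + 1, d)
              = pvEmit c0 ++ pvEmit d := by
            rw [pvStepA_other _ _ _ _ (by rintro ⟨h, _⟩; omega) ?h2]
            rintro ⟨_, hdig, hget⟩
            rw [hget0] at hget
            apply hdd
            simp only [Bool.and_eq_true, beq_iff_eq]
            exact ⟨Option.some.inj hget, hdig⟩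
          rw [hstep1,
            pvFold_tail (c0 :: d :: rest2) rest2 (pvEmit c0 ++ pvEmit d) (0 + 1 + 1)
              (by omega) (Or.inl (by omega))]
          rw [Bool.not_eq_true] at hdd
          simp only [Bool.false_eq_true, if_false]
          rw [hdd]
          simp only [Bool.false_eq_true, if_false]
          rw [← pvFlatten_emit]
          simp [List.flatMap_cons]
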